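-- pv_equiv track=rewrite | github.com/poke-mada/server | pokemon_api/scripting/save_reader.py | clean_nick_data
-- ===== SOURCE A (Python) =====
-- def clean_nick_data(nick_elements):
--     result = ''
--     for char in nick_elements:
--         if char == 0:
--             return result
--         else:
--             result += chr(char)
--     return result
-- ===== SOURCE B (Python) =====
-- def clean_nick_data(nick_elements):
--     # Find the terminator first, then convert the prefix in one map/join pass.
--     if 0 in nick_elements:
--         prefix = nick_elements[:nick_elements.index(0)]
--     else:
--         prefix = nick_elements
--     return ''.join(chr(c) for c in prefix)
-- ===== Notes on version B (the rewrite author's own statement) =====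
-- stated objective: idiomatic
-- what changed: B replaces A's interleaved test-and-build loop (early return inside the accumulation) with two separate passes: find the index of the first 0 and slice the prefix, then map chr over it and join.
-- outside the precondition, e.g. on clean_nick_data([-1]): A raises ValueError, B raises ValueError
import Mathlib
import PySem

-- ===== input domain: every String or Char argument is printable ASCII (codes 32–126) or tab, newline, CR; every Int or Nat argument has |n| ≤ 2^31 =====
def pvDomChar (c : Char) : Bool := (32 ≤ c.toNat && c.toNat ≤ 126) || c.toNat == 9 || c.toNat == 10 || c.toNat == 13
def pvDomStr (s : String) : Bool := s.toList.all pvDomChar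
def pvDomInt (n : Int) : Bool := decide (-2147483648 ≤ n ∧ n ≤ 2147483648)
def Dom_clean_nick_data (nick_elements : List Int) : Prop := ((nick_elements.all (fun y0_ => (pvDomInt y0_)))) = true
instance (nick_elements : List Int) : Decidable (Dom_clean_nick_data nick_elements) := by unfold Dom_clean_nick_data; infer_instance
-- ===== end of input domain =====

-- B replaces A's interleaved test-and-build loop (early return inside the accumulation)
-- with two separate passes: find the first 0 and slice the prefix, then map chr and join.
-- Objective: idiomatic; same O(n) cost.

-- ===== PORT A =====
-- chr(c) ported by hand as Char.ofNat c.toNat; exact for 0 ≤ c < 0x110000 excluding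
-- surrogates, which Pre_ guarantees for every character actually converted.
def clean_nick_data_loop (acc : List Char) : List Int → List Char
  | [] => acc
  | c :: rest =>
      if c == 0 then acc
      else clean_nick_data_loop (acc ++ [Char.ofNat c.toNat]) rest

def clean_nick_data (nick_elements : List Int) : String :=
  String.ofList (clean_nick_data_loop [] nick_elements)

-- ===== PORT B =====
def clean_nick_data_alt (nick_elements : List Int) : String :=
  let pref :=
    match PySem.List.index? nick_elements 0 with
    | some i => PySem.List.slice nick_elements none (some (i : Int))
    | none => nick_elements
  String.ofList (pref.map (fun c => Char.ofNat c.toNat))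

-- ===== PRECONDITION & SPEC =====
-- Pre_ excludes inputs on which Python's chr raises ValueError (a code < 0 or ≥ 0x110000
-- before the first 0) and inputs with a surrogate code (0xD800–0xDFFF) before the first 0,
-- on which A returns a lone-surrogate str that is not representable as a Lean String.
def Pre_clean_nick_data (nick_elements : List Int) : Prop :=
  ∀ c ∈ nick_elements.takeWhile (· ≠ 0),
    (0 ≤ c ∧ c < 55296) ∨ (57344 ≤ c ∧ c < 1114112)
instance (nick_elements : List Int) : Decidable (Pre_clean_nick_data nick_elements) := by
  unfold Pre_clean_nick_data; infer_instance
def pvWitness_clean_nick_data : List Int := [80, 105, 107, 97, 0, 99]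

def Spec_clean_nick_data (nick_elements : List Int) (out : String) : Prop := out = clean_nick_data_alt nick_elements
instance (nick_elements : List Int) (out : String) : Decidable (Spec_clean_nick_data nick_elements out) := by unfold Spec_clean_nick_data; infer_instance

-- ===== CLAIM (what is proved, stated in full; the proofs are below) =====
def Claim_equal_clean_nick_data : Prop := ∀ (nick_elements : List Int), Dom_clean_nick_data nick_elements → Pre_clean_nick_data nick_elements → Spec_clean_nick_data nick_elements (clean_nick_data nick_elements)

-- ===== LEMMAS AND PROOFS =====

-- A's loop produces acc ++ the chr-image of the prefix before the first 0.
theorem clean_nick_data_loop_eq (l : List Int) (acc : List Char) :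
    clean_nick_data_loop acc l =
      acc ++ (l.takeWhile (· ≠ 0)).map (fun c => Char.ofNat c.toNat) := by
  induction l generalizing acc with
  | nil => simp [clean_nick_data_loop]
  | cons c rest ih =>
      by_cases h : c = 0
      · simp [clean_nick_data_loop, h, List.takeWhile]
      · simp [clean_nick_data_loop, h, List.takeWhile, ih]

-- B's prefix is exactly the takeWhile-prefix before the first 0.
theorem clean_nick_data_prefix_eq (l : List Int) :
    (match PySem.List.index? l 0 with
      | some i => PySem.List.slice l none (some (i : Int))
      | none => l) = l.takeWhile (· ≠ 0) := by
  induction l with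
  | nil => simp [PySem.List.index?, List.takeWhile]
  | cons c rest ih =>
      by_cases h : c = 0
      · subst h
        rw [PySem.List.index?_cons_self]
        show PySem.List.slice (0 :: rest) none (some ((0 : Nat) : Int)) = _
        rw [PySem.List.slice_to_natCast (0 :: rest) 0]
        simp
      · rw [PySem.List.index?_cons_of_ne rest h]
        cases hi : PySem.List.index? rest 0 with
        | none =>
            simp only [hi] at ih ⊢
            rw [List.takeWhile_cons]
            simp only [h, decide_false, Bool.not_false, if_true, decide_not]
            simp only [decide_not] at ih
            simp [← ih]
        | some i =>
            simp only [hi, Option.map_some]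
            show PySem.List.slice (c :: rest) none (some (((i + 1 : Nat)) : Int)) = _
            rw [show (((i + 1 : Nat)) : Int) = (((i + 1 : Nat) : Nat) : Int) from rfl,
              PySem.List.slice_to_natCast]
            simp only [hi] at ih
            rw [PySem.List.slice_to_natCast] at ih
            simp [List.take_succ_cons, ih, List.takeWhile_cons, h]

-- ===== VERDICT (by name: the statement is the Claim_ definition above) =====
theorem clean_nick_data_spec : Claim_equal_clean_nick_data := by
  intro l _ _
  unfold Spec_clean_nick_data clean_nick_data clean_nick_data_alt
  rw [clean_nick_data_prefix_eq, clean_nick_data_loop_eq]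
  simp
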